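-- pv_equiv track=rewrite | github.com/prasanna-in/gmail-Skill | skills/gmail/scripts/gmail_rlm_helpers.py | batch_extract_summaries
-- ===== SOURCE A (Python) =====
-- def extract_email_summary(email: dict) -> str:
--     """
--     Create a concise text summary of an email for LLM context.
--
--     Args:
--         email: Email dictionary
--
--     Returns:
--         Formatted summary string
--     """
--     parts = []
--
--     if email.get('from'):
--         parts.append(f"From: {email['from']}")
--     if email.get('subject'):
--         parts.append(f"Subject: {email['subject']}")
--     if email.get('date'):
--         parts.append(f"Date: {email['date']}")
--     if email.get('snippet'):
--         parts.append(f"Preview: {email['snippet']}")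
--
--     return '\n'.join(parts)
--
-- def batch_extract_summaries(emails: list[dict], max_chars: int = 4000) -> str:
--     """
--     Create a combined summary of multiple emails, respecting character limit.
--
--     Useful for creating context for LLM sub-queries without exceeding limits.
--
--     Args:
--         emails: List of email dictionaries
--         max_chars: Maximum total characters (default: 4000)
--
--     Returns:
--         Combined summary string
--     """
--     summaries = []
--     total_chars = 0
--
--     for i, email in enumerate(emails):
--         summary = f"[{i+1}] {extract_email_summary(email)}"
--         summary_len = len(summary) + 2  # +2 for newlines
--
--         if total_chars + summary_len > max_chars:
--             summaries.append(f"... and {len(emails) - i} more emails")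
--             break
--
--         summaries.append(summary)
--         total_chars += summary_len
--
--     return '\n\n'.join(summaries)
-- ===== SOURCE B (Python) =====
-- def extract_email_summary(email: dict) -> str:
--     fields = [('From', 'from'), ('Subject', 'subject'), ('Date', 'date'), ('Preview', 'snippet')]
--     return '\n'.join(f"{label}: {email[key]}" for label, key in fields if email.get(key))
--
--
-- def batch_extract_summaries(emails: list[dict], max_chars: int = 4000) -> str:
--     summaries = [f"[{i + 1}] {extract_email_summary(e)}" for i, e in enumerate(emails)]
--     # inclusive prefix sums of the charged lengths (each summary + 2 for its separator)
--     prefix = []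
--     run = 0
--     for s in summaries:
--         run += len(s) + 2
--         prefix.append(run)
--     # cutoff: first index whose cumulative total exceeds the limit
--     idx = len(summaries)
--     for j, p in enumerate(prefix):
--         if p > max_chars:
--             idx = j
--             break
--     parts = summaries[:idx]
--     if idx < len(emails):
--         parts.append(f"... and {len(emails) - idx} more emails")
--     return '\n\n'.join(parts)
-- ===== Notes on version B (the rewrite author's own statement) =====
-- stated objective: alternative
-- what changed: Replaced A's single accumulate-and-break loop (running total, conditional early break appending the '... and N more' line) by a staged pipeline: build all numbered summaries, compute the inclusive prefix sums of charged lengths, locate the first prefix sum exceeding max_chars as a cutoff index, then slice and join; also rewrote the helper as a filter/map over a (label,key) table instead of four sequential ifs.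
import Mathlib
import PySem

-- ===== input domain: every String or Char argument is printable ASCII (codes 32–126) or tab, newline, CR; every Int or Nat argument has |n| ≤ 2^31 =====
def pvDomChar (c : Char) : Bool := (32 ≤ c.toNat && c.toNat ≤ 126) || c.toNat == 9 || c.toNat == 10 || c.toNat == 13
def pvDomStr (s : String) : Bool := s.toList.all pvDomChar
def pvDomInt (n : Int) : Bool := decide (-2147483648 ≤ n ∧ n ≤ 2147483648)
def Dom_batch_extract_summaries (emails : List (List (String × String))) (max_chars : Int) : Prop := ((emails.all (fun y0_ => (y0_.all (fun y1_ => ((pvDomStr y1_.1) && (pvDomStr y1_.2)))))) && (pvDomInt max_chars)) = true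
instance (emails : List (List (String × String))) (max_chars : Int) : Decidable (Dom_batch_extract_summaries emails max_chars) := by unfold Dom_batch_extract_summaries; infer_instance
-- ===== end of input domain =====

-- B replaces A's single accumulate-and-break loop by: build all numbered summaries, build their
-- inclusive prefix-sum of charged lengths, find the cutoff index, then slice and join (alternative decomposition; no speed claim).


-- ===== PORT A =====

-- Python truthiness of email.get(k): None and '' are falsy
def pvTruthy (o : Option String) : Bool :=
  match o with
  | none => false
  | some s => s != ""

def extract_email_summary (email : List (String × String)) : String :=
  let d := PySem.Dict.mk email
  let parts : List String := []
  let parts := if pvTruthy (d.get? "from") then parts ++ ["From: " ++ d.getD "from" ""] else parts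
  let parts := if pvTruthy (d.get? "subject") then parts ++ ["Subject: " ++ d.getD "subject" ""] else parts
  let parts := if pvTruthy (d.get? "date") then parts ++ ["Date: " ++ d.getD "date" ""] else parts
  let parts := if pvTruthy (d.get? "snippet") then parts ++ ["Preview: " ++ d.getD "snippet" ""] else parts
  PySem.Str.join "\n" parts

-- the for-loop of A: i = enumerate index, total = total_chars; break returns the "... and" line
def pvALoop (max_chars n : Int) : List (List (String × String)) → Int → Int → List String
  | [], _, _ => []
  | email :: rest, i, total =>
    let summary := "[" ++ PySem.Int.toStr (i + 1) ++ "] " ++ extract_email_summary email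
    let summary_len := PySem.Str.len summary + 2
    if total + summary_len > max_chars then
      ["... and " ++ PySem.Int.toStr (n - i) ++ " more emails"]
    else
      summary :: pvALoop max_chars n rest (i + 1) (total + summary_len)

def batch_extract_summaries (emails : List (List (String × String))) (max_chars : Int) : String :=
  PySem.Str.join "\n\n" (pvALoop max_chars (PySem.List.len emails) emails 0 0)

-- ===== PORT B =====

def extract_email_summary_alt (email : List (String × String)) : String :=
  let d := PySem.Dict.mk email
  let fields : List (String × String) :=
    [("From", "from"), ("Subject", "subject"), ("Date", "date"), ("Preview", "snippet")]
  PySem.Str.join "\n"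
    ((fields.filter (fun p => pvTruthy (d.get? p.2))).map (fun p => p.1 ++ ": " ++ d.getD p.2 ""))

-- inclusive prefix sums of the charged lengths (len(s) + 2), from running total `run`
def pvPrefix : List String → Int → List Int
  | [], _ => []
  | s :: rest, run =>
    let run' := run + PySem.Str.len s + 2
    run' :: pvPrefix rest run'

-- first index whose prefix sum exceeds the limit (the list's length if none does)
def pvCutoff : List Int → Int → Nat
  | [], _ => 0
  | p :: rest, m => if p > m then 0 else 1 + pvCutoff rest m

def batch_extract_summaries_alt (emails : List (List (String × String))) (max_chars : Int) : String :=
  let summaries := (PySem.List.enumerate emails 0).map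
    (fun p => "[" ++ PySem.Int.toStr (p.1 + 1) ++ "] " ++ extract_email_summary_alt p.2)
  let prefixSums := pvPrefix summaries 0
  let idx := pvCutoff prefixSums max_chars
  let parts := summaries.take idx ++
    (if idx < emails.length then
      ["... and " ++ PySem.Int.toStr (PySem.List.len emails - (idx : Int)) ++ " more emails"]
    else [])
  PySem.Str.join "\n\n" parts

-- ===== PRECONDITION & SPEC =====
def Spec_batch_extract_summaries (emails : List (List (String × String))) (max_chars : Int) (out : String) : Prop := out = batch_extract_summaries_alt emails max_chars
instance (emails : List (List (String × String))) (max_chars : Int) (out : String) : Decidable (Spec_batch_extract_summaries emails max_chars out) := by unfold Spec_batch_extract_summaries; infer_instance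

-- ===== CLAIM (what is proved, stated in full; the proofs are below) =====
def Claim_equal_batch_extract_summaries : Prop := ∀ (emails : List (List (String × String))) (max_chars : Int), Dom_batch_extract_summaries emails max_chars → Spec_batch_extract_summaries emails max_chars (batch_extract_summaries emails max_chars)

-- ===== LEMMAS AND PROOFS =====

theorem extract_eq (e : List (String × String)) :
    extract_email_summary e = extract_email_summary_alt e := by
  unfold extract_email_summary extract_email_summary_alt
  simp only [List.filter]
  split_ifs <;> simp_all

-- B's summaries built over an enumerate starting at i
def pvSums (i : Int) (es : List (List (String × String))) : List String :=
  (PySem.List.enumerate es i).map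
    (fun p => "[" ++ PySem.Int.toStr (p.1 + 1) ++ "] " ++ extract_email_summary_alt p.2)

theorem loop_eq (m n : Int) :
    ∀ (es : List (List (String × String))) (i t : Int),
      pvALoop m n es i t =
        (pvSums i es).take (pvCutoff (pvPrefix (pvSums i es) t) m) ++
          (if pvCutoff (pvPrefix (pvSums i es) t) m < es.length then
            ["... and " ++
              PySem.Int.toStr (n - (i + (pvCutoff (pvPrefix (pvSums i es) t) m : Int))) ++
              " more emails"]
          else []) := by
  intro es
  induction es with
  | nil => intro i t; simp [pvALoop, pvSums, pvPrefix, pvCutoff]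
  | cons e r ih =>
    intro i t
    have hs : pvSums i (e :: r) =
        ("[" ++ PySem.Int.toStr (i + 1) ++ "] " ++ extract_email_summary_alt e) :: pvSums (i + 1) r := by
      simp [pvSums, PySem.List.enumerate_cons]
    set s := "[" ++ PySem.Int.toStr (i + 1) ++ "] " ++ extract_email_summary_alt e with hsdef
    rw [hs]
    unfold pvALoop
    rw [extract_eq]
    simp only [pvPrefix, pvCutoff]
    have hc : t + (PySem.Str.len s + 2) = t + PySem.Str.len s + 2 := by ring
    rw [hc]
    by_cases h : t + PySem.Str.len s + 2 > m
    · have h2 : m < t + (s.length : Int) + 2 := by simpa using h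
      simp [h2]
    · rw [if_neg h, if_neg h, ih (i + 1) (t + PySem.Str.len s + 2)]
      set k := pvCutoff (pvPrefix (pvSums (i + 1) r) (t + PySem.Str.len s + 2)) m with hk
      have harg : n - (i + ((1 + k : Nat) : Int)) = n - (i + 1 + (k : Int)) := by
        push_cast; ring
      rw [Nat.add_comm 1 k] at harg ⊢
      rw [List.take_succ_cons, List.cons_append, harg]
      simp only [List.length_cons, Nat.add_lt_add_iff_right, ← hsdef]

-- ===== VERDICT (by name: the statement is the Claim_ definition above) =====
theorem batch_extract_summaries_spec : Claim_equal_batch_extract_summaries := by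
  intro emails max_chars _
  unfold Spec_batch_extract_summaries batch_extract_summaries batch_extract_summaries_alt
  rw [loop_eq]
  simp [pvSums, PySem.List.len_eq]
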